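-- pv_equiv track=rewrite | github.com/therealaleph/MasterHttpRelayVPN-RUST | mhr-cfw/core/proxy_server.py | _is_likely_download
-- ===== SOURCE A (Python) =====
-- def _is_likely_download(url: str, headers: dict) -> bool:
--     """Heuristic: is this URL likely a large file download?"""
--     # Check file extension
--     path = url.split("?")[0].lower()
--     large_exts = {
--         ".zip", ".tar", ".gz", ".bz2", ".xz", ".7z", ".rar",
--         ".exe", ".msi", ".dmg", ".deb", ".rpm", ".apk",
--         ".iso", ".img",
--         ".mp4", ".mkv", ".avi", ".mov", ".webm",
--         ".mp3", ".flac", ".wav", ".aac",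
--         ".pdf", ".doc", ".docx", ".ppt", ".pptx",
--         ".wasm",
--     }
--     for ext in large_exts:
--         if path.endswith(ext):
--             return True
--     return False
-- ===== SOURCE B (Python) =====
-- def _is_likely_download(url: str, headers: dict) -> bool:
--     """Heuristic: is this URL likely a large file download?"""
--     path = url.split("?")[0].lower()
--     large_exts = {
--         ".zip", ".tar", ".gz", ".bz2", ".xz", ".7z", ".rar",
--         ".exe", ".msi", ".dmg", ".deb", ".rpm", ".apk",
--         ".iso", ".img",
--         ".mp4", ".mkv", ".avi", ".mov", ".webm",
--         ".mp3", ".flac", ".wav", ".aac",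
--         ".pdf", ".doc", ".docx", ".ppt", ".pptx",
--         ".wasm",
--     }
--     idx = path.rfind(".")
--     return idx != -1 and path[idx:] in large_exts
-- ===== Notes on version B (the rewrite author's own statement) =====
-- stated objective: idiomatic
-- what changed: Replaces the per-extension endswith scan over the whole set with a single rfind of the last dot followed by one set-membership lookup of the final '.ext' segment.
import Mathlib
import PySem

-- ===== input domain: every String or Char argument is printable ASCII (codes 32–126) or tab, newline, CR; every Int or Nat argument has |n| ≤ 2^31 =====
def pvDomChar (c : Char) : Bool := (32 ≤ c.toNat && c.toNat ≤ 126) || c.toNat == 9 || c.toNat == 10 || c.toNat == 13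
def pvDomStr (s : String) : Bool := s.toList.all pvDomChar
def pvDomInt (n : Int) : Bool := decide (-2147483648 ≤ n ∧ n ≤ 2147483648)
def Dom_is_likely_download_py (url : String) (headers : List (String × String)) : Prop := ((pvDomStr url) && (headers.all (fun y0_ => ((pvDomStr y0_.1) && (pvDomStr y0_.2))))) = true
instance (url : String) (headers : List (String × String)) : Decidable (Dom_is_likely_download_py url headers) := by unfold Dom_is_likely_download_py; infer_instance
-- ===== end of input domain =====

-- B replaces A's per-extension endswith scan by one rfind of the last dot plus a single
-- set-membership lookup of the final '.ext' segment (more idiomatic; equal return values).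

-- ===== PORT A =====
-- the `large_exts` set literal, in source order (shared by both ports, as in both Pythons)
def pvLargeExts : List (List Char) :=
  [".zip".toList, ".tar".toList, ".gz".toList, ".bz2".toList, ".xz".toList, ".7z".toList, ".rar".toList,
   ".exe".toList, ".msi".toList, ".dmg".toList, ".deb".toList, ".rpm".toList, ".apk".toList,
   ".iso".toList, ".img".toList,
   ".mp4".toList, ".mkv".toList, ".avi".toList, ".mov".toList, ".webm".toList,
   ".mp3".toList, ".flac".toList, ".wav".toList, ".aac".toList,
   ".pdf".toList, ".doc".toList, ".docx".toList, ".ppt".toList, ".pptx".toList,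
   ".wasm".toList]

-- 'for ext in large_exts: if path.endswith(ext): return True' / 'return False'
def pvExtLoop : List (List Char) → List Char → Bool
  | [], _ => false
  | e :: rest, path => if PySem.Chars.endswith path e then true else pvExtLoop rest path

def is_likely_download_py (url : String) (headers : List (String × String)) : Bool :=
  -- url.split("?")[0].lower(); split with a nonempty separator never returns [], so [0] is headD
  let path := PySem.Chars.lower ((PySem.Chars.splitOn url.toList ['?']).headD [])
  pvExtLoop (PySem.Set.ofList pvLargeExts) path

-- ===== PORT B =====
def is_likely_download_py_alt (url : String) (headers : List (String × String)) : Bool :=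
  let path := PySem.Chars.lower ((PySem.Chars.splitOn url.toList ['?']).headD [])
  let idx := PySem.Chars.rfind path ['.']
  if idx = -1 then false
  else (PySem.Set.ofList pvLargeExts).contains (PySem.Chars.slice path (some idx) none)

-- ===== PRECONDITION & SPEC =====
def Spec_is_likely_download_py (url : String) (headers : List (String × String)) (out : Bool) : Prop := out = is_likely_download_py_alt url headers
instance (url : String) (headers : List (String × String)) (out : Bool) : Decidable (Spec_is_likely_download_py url headers out) := by unfold Spec_is_likely_download_py; infer_instance

-- ===== CLAIM (what is proved, stated in full; the proofs are below) =====
def Claim_equal_is_likely_download_py : Prop := ∀ (url : String) (headers : List (String × String)), Dom_is_likely_download_py url headers → Spec_is_likely_download_py url headers (is_likely_download_py url headers)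

-- ===== LEMMAS AND PROOFS =====

theorem pvSet_eq : PySem.Set.ofList pvLargeExts = pvLargeExts := by decide

theorem pvExtLoop_eq_any (E : List (List Char)) (p : List Char) :
    pvExtLoop E p = E.any (fun e => PySem.Chars.endswith p e) := by
  induction E with
  | nil => rfl
  | cons e rest ih => cases h : PySem.Chars.endswith p e <;> simp [pvExtLoop, h, ih]

-- every extension is '.' followed by a dot-free tail
theorem pvExtsOK : ∀ e ∈ pvLargeExts, e ≠ [] ∧ e.headD ' ' = '.' ∧ '.' ∉ e.tail := by decide

theorem pvDotPrefix_iff (xs : List Char) : ['.'].isPrefixOf xs = true ↔ xs.head? = some '.' := by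
  rw [List.isPrefixOf_iff_prefix]
  cases xs <;> simp [List.cons_prefix_cons, eq_comm]

theorem pvGo_zero (s sub : List Char) :
    PySem.Chars.rfind.go s sub 0 = if sub.isPrefixOf s then 0 else -1 := by
  rw [PySem.Chars.rfind.go.eq_def]

theorem pvGo_succ (s sub : List Char) (j : Nat) :
    PySem.Chars.rfind.go s sub (j + 1)
      = if sub.isPrefixOf (s.drop (j + 1)) then ((j : Int) + 1) else PySem.Chars.rfind.go s sub j := by
  rw [PySem.Chars.rfind.go.eq_def]; push_cast; rfl

theorem pvGo_found (s sub : List Char) (k i : Nat) (hik : i ≤ k)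
    (hp : sub.isPrefixOf (s.drop i) = true)
    (hn : ∀ j, i < j → j ≤ k → sub.isPrefixOf (s.drop j) = false) :
    PySem.Chars.rfind.go s sub k = (i : Int) := by
  induction k with
  | zero =>
    interval_cases i
    rw [pvGo_zero, if_pos (by simpa using hp)]
    rfl
  | succ j ih =>
    rw [pvGo_succ]
    by_cases hij : i = j + 1
    · subst hij; rw [if_pos hp]; norm_cast
    · have hij' : i ≤ j := by omega
      rw [hn (j + 1) (by omega) (by omega)]
      simp only [Bool.false_eq_true, if_false]
      exact ih hij' (fun m h1 h2 => hn m h1 (by omega))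

theorem pvGo_mem (s sub : List Char) (k : Nat) :
    PySem.Chars.rfind.go s sub k = -1 ∨
      ∃ j, j ≤ k ∧ PySem.Chars.rfind.go s sub k = (j : Int) ∧ sub.isPrefixOf (s.drop j) = true := by
  induction k with
  | zero =>
    rw [pvGo_zero]
    cases h : sub.isPrefixOf s
    · left; simp
    · right; exact ⟨0, le_refl 0, by simp, by simpa using h⟩
  | succ j ih =>
    rw [pvGo_succ]
    cases h : sub.isPrefixOf (s.drop (j + 1))
    · simp only [Bool.false_eq_true, if_false]
      rcases ih with h1 | ⟨m, hm1, hm2, hm3⟩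
      · left; exact h1
      · right; exact ⟨m, by omega, hm2, hm3⟩
    · right
      refine ⟨j + 1, le_refl _, by simp, h⟩

-- if p = pre ++ '.'::r with no dot in r, the last dot is at index pre.length
theorem pvRfind_of_suffix (pre r : List Char) (hr : '.' ∉ r) :
    PySem.Chars.rfind (pre ++ '.' :: r) ['.'] = (pre.length : Int) := by
  show PySem.Chars.rfind.go _ _ _ = _
  apply pvGo_found
  · simp only [List.length_append, List.length_cons]; omega
  · rw [List.drop_left]
    simp [List.isPrefixOf]
  · intro j h1 h2
    have hj : j = pre.length + (1 + (j - pre.length - 1)) := by omega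
    rw [hj, List.drop_length_add_append]
    rw [Nat.add_comm 1 (j - pre.length - 1), List.drop_succ_cons]
    by_contra hcon
    have hp : ['.'].isPrefixOf (r.drop (j - pre.length - 1)) = true := by
      simpa using hcon
    rw [pvDotPrefix_iff] at hp
    exact hr (List.mem_of_mem_drop (List.mem_of_mem_head? hp))

-- the key fact, for an arbitrary path
theorem pvKey (p : List Char) :
    pvExtLoop (PySem.Set.ofList pvLargeExts) p
      = (if PySem.Chars.rfind p ['.'] = -1 then false
         else (PySem.Set.ofList pvLargeExts).contains
                (PySem.Chars.slice p (some (PySem.Chars.rfind p ['.'])) none)) := by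
  rw [pvSet_eq, pvExtLoop_eq_any]
  by_cases hA : ∃ e ∈ pvLargeExts, PySem.Chars.endswith p e = true
  · obtain ⟨e, he, hend⟩ := hA
    obtain ⟨hne, hhd, htl⟩ := pvExtsOK e he
    obtain ⟨pre, hpre⟩ := (PySem.Chars.endswith_iff p e).mp hend
    have hedecomp : e = '.' :: e.tail := by
      cases e with
      | nil => exact absurd rfl hne
      | cons a l => simpa using hhd ▸ rfl
    have hrf : PySem.Chars.rfind p ['.'] = (pre.length : Int) := by
      rw [← hpre, hedecomp]
      exact pvRfind_of_suffix pre e.tail htl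
    rw [hrf]
    have hpos : ((pre.length : Int)) ≠ -1 := by omega
    rw [if_neg hpos]
    have hslice : PySem.Chars.slice p (some ((pre.length : Int))) none = e := by
      simp only [PySem.Chars.slice_eq_listSlice, PySem.List.slice_from_natCast]
      rw [← hpre, List.drop_left]
    rw [hslice]
    have hc : PySem.Set.contains pvLargeExts e = true := by
      simpa [PySem.Set.contains] using List.contains_iff_mem.mpr he
    rw [hc]
    simp only [List.any_eq_true]
    exact ⟨e, he, hend⟩
  · push Not at hA
    have hany : pvLargeExts.any (fun e => PySem.Chars.endswith p e) = false := by
      simp only [List.any_eq_false]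
      intro e he
      simpa using hA e he
    rw [hany]
    rcases pvGo_mem p ['.'] p.length with h1 | ⟨j, hj1, hj2, _⟩
    · rw [show PySem.Chars.rfind p ['.'] = -1 from h1, if_pos rfl]
    · have hrf : PySem.Chars.rfind p ['.'] = (j : Int) := hj2
      rw [hrf, if_neg (by omega)]
      by_contra hcon
      have hmem : PySem.Chars.slice p (some ((j : Int))) none ∈ pvLargeExts := by
        simp only [PySem.Set.contains] at hcon
        exact List.contains_iff_mem.mp (by simpa using hcon)
      have hslice : PySem.Chars.slice p (some ((j : Int))) none = p.drop j := by
        simp [PySem.Chars.slice_eq_listSlice, PySem.List.slice_from_natCast]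
      rw [hslice] at hmem
      have hend : PySem.Chars.endswith p (p.drop j) = true :=
        (PySem.Chars.endswith_iff p (p.drop j)).mpr (List.drop_suffix j p)
      exact absurd hend (by simpa using hA _ hmem)

-- ===== VERDICT (by name: the statement is the Claim_ definition above) =====
theorem is_likely_download_py_spec : Claim_equal_is_likely_download_py := by
  intro url headers _
  unfold Spec_is_likely_download_py is_likely_download_py is_likely_download_py_alt
  exact pvKey _
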